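-- pv_equiv track=rewrite | github.com/virtuoushub/whisperer | whisperer/whisperer.py | get_silence_pairs
-- ===== SOURCE A (Python) =====
-- from typing import Tuple, List
--
-- def get_silence_pairs(splits) -> List[Tuple[int, int]]:
--     pairs = []
--     splits_iter = iter(splits)
--
--     for _ in range(len(splits) - 1):
--         start = next(splits_iter, None)
--         end = next(splits_iter, None)
--
--         if start is not None and end is not None:
--             pairs.append((start[1], end[0]))
--         else:
--             break
--
--     return pairs
-- ===== SOURCE B (Python) =====
-- def get_silence_pairs(splits):
--     return [(splits[i - 1][1], splits[i][0]) for i in range(1, len(splits), 2)]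
-- ===== Notes on version B (the rewrite author's own statement) =====
-- stated objective: simpler
-- what changed: Replaced the explicit iterator with next-sentinels, a range(len-1) loop and a break by a single closed-form comprehension over the odd indices range(1, len, 2) that pairs splits[i-1][1] with splits[i][0].
import Mathlib
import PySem

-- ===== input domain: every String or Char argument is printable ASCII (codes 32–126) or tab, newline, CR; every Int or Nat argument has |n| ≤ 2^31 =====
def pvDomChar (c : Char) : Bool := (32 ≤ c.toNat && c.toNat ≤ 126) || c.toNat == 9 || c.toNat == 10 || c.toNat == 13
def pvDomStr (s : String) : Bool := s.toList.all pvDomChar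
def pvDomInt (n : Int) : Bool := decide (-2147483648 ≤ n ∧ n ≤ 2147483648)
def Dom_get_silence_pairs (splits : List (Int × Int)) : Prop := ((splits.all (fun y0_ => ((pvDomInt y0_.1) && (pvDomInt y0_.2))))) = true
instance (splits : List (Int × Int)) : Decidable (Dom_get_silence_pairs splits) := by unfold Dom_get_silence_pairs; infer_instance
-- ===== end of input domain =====

-- B replaces A's iterator/next-sentinel/break loop with one closed-form comprehension over the odd indices (simpler decomposition, same cost).

-- ===== PORT A =====
-- the for-loop over range(len(splits)-1): fuel = remaining iterations; the iterator state is
-- the unconsumed suffix; 'break' (a 'next' returned None) = returning the accumulated pairs.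
def goA : Nat → List (Int × Int) → List (Int × Int) → List (Int × Int)
  | 0, _, pairs => pairs
  | Nat.succ fuel, l, pairs =>
    match l with
    | a :: b :: rest => goA fuel rest (pairs ++ [(a.2, b.1)])
    | _ => pairs

def get_silence_pairs (splits : List (Int × Int)) : List (Int × Int) :=
  goA (splits.length - 1) splits []

-- ===== PORT B =====
-- [(splits[i-1][1], splits[i][0]) for i in range(1, len(splits), 2)]; the indices i-1, i are
-- always in range here, so pyGetD with a dummy default is exact for Python's splits[i].
def get_silence_pairs_alt (splits : List (Int × Int)) : List (Int × Int) :=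
  (PySem.List.pyRange 1 (splits.length : Int) 2).map
    (fun i => ((PySem.List.pyGetD splits (i - 1) (0, 0)).2,
               (PySem.List.pyGetD splits i (0, 0)).1))

-- ===== PRECONDITION & SPEC =====
def Spec_get_silence_pairs (splits : List (Int × Int)) (out : List (Int × Int)) : Prop := out = get_silence_pairs_alt splits
instance (splits : List (Int × Int)) (out : List (Int × Int)) : Decidable (Spec_get_silence_pairs splits out) := by unfold Spec_get_silence_pairs; infer_instance

-- ===== CLAIM (what is proved, stated in full; the proofs are below) =====
def Claim_equal_get_silence_pairs : Prop := ∀ (splits : List (Int × Int)), Dom_get_silence_pairs splits → Spec_get_silence_pairs splits (get_silence_pairs splits)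

-- ===== LEMMAS AND PROOFS =====

-- common reference value: consecutive disjoint pairs
def pairsOf : List (Int × Int) → List (Int × Int)
  | a :: b :: rest => (a.2, b.1) :: pairsOf rest
  | _ => []

theorem goA_eq (fuel : Nat) : ∀ (l acc : List (Int × Int)),
    l.length ≤ 2 * fuel + 1 → goA fuel l acc = acc ++ pairsOf l := by
  induction fuel with
  | zero =>
    intro l acc h
    match l with
    | [] => simp [goA, pairsOf]
    | [a] => simp [goA, pairsOf]
    | a :: b :: r => simp at h
  | succ f ih =>
    intro l acc h
    match l with
    | [] => simp [goA, pairsOf]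
    | [a] => simp [goA, pairsOf]
    | a :: b :: r =>
      have hr : r.length ≤ 2 * f + 1 := by simp at h; omega
      simp [goA, pairsOf, ih r _ hr]

theorem portA_eq (splits : List (Int × Int)) :
    get_silence_pairs splits = pairsOf splits := by
  have h : splits.length ≤ 2 * (splits.length - 1) + 1 := by
    cases splits with
    | nil => simp
    | cons a t => simp; omega
  simpa using goA_eq (splits.length - 1) splits [] h

theorem range_map_eq (l : List (Int × Int)) :
    (List.range (l.length / 2)).map
      (fun k => ((l.getD (2 * k) (0, 0)).2, (l.getD (2 * k + 1) (0, 0)).1))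
      = pairsOf l := by
  match l with
  | [] => simp [pairsOf]
  | [a] => simp [pairsOf]
  | a :: b :: r =>
    have hlen : (a :: b :: r).length / 2 = r.length / 2 + 1 := by simp; omega
    rw [hlen, List.range_succ_eq_map]
    simp only [List.map_cons, List.map_map]
    have : ((fun k => ((((a :: b :: r).getD (2 * k) (0, 0)).2,
            ((a :: b :: r).getD (2 * k + 1) (0, 0)).1))) ∘ Nat.succ)
        = (fun k => ((r.getD (2 * k) (0, 0)).2, (r.getD (2 * k + 1) (0, 0)).1)) := by
      funext k
      have e1 : 2 * Nat.succ k = (2 * k) + 1 + 1 := by omega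
      simp only [Function.comp, e1, List.getD_cons_succ]
    rw [this, range_map_eq r]
    simp [pairsOf, List.getD]

theorem portB_eq (splits : List (Int × Int)) :
    get_silence_pairs_alt splits = pairsOf splits := by
  unfold get_silence_pairs_alt
  rw [PySem.List.pyRange_of_pos 1 (splits.length : Int) (by norm_num : (0:Int) < 2)]
  rw [← range_map_eq splits]
  have hcount : (if (1:Int) < (splits.length : Int)
      then (((splits.length : Int) - 1 + 2 - 1) / 2).toNat else 0) = splits.length / 2 := by
    split_ifs with h
    · have : ((splits.length : Int) - 1 + 2 - 1) = (splits.length : Int) := by ring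
      rw [this]
      omega
    · omega
  rw [hcount, List.map_map]
  apply List.map_congr_left
  intro k hk
  simp only [List.mem_range] at hk
  have hk2 : 2 * k + 1 < splits.length := by omega
  simp only [Function.comp]
  have h1 : PySem.List.pyGetD splits ((1:Int) + 2 * (k:Int) - 1) (0, 0)
      = splits.getD (2 * k) (0, 0) := by
    rw [PySem.List.pyGetD_of_nonneg]
    · congr 1
      omega
    · omega
  have h2 : PySem.List.pyGetD splits ((1:Int) + 2 * (k:Int)) (0, 0)
      = splits.getD (2 * k + 1) (0, 0) := by
    rw [PySem.List.pyGetD_of_nonneg]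
    · congr 1
      omega
    · omega
  rw [h1, h2]

-- ===== VERDICT (by name: the statement is the Claim_ definition above) =====
theorem get_silence_pairs_spec : Claim_equal_get_silence_pairs := by
  intro splits _
  unfold Spec_get_silence_pairs
  rw [portA_eq, portB_eq]
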